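-- pv_equiv track=rewrite | github.com/splitgraph/sgr | test/splitgraph/commands/test_sqlalchemy_fdw.py | _extract_queries_from_explain
-- ===== SOURCE A (Python) =====
-- def _extract_queries_from_explain(result):
--     queries = []
--     query_str = None
--
--     for o in result:
--         if query_str is not None:
--             query_str += o[0]
--         elif "Multicorn: " in o[0]:
--             query_str = ""
--
--         if o == ("",):
--             queries.append(query_str)
--             query_str = None
--
--     return queries
-- ===== SOURCE B (Python) =====
-- def _render(g):
--     i = next((i for i, o in enumerate(g) if "Multicorn: " in o[0]), None)
--     if i is None:
--         return None
--     return "".join(o[0] for o in g[i + 1:])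
--
--
-- def _extract_queries_from_explain(result):
--     # Two phases: partition the rows into sentinel-terminated groups
--     # (rows after the last ("",) sentinel are discarded), then render
--     # each group independently.
--     groups = []
--     cur = []
--     for o in result:
--         cur.append(o)
--         if o == ("",):
--             groups.append(cur)
--             cur = []
--     return [_render(g) for g in groups]
-- ===== Notes on version B (the rewrite author's own statement) =====
-- stated objective: alternative
-- what changed: A's single-pass state machine (an in-flight query string accumulated and flushed at each ('',) sentinel) is replaced by a two-phase decomposition: first partition the rows into sentinel-terminated groups (rows after the last sentinel are discarded), then render each group independently by finding the first 'Multicorn: ' marker and joining the row heads after it.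
-- outside the precondition, e.g. on _extract_queries_from_explain([('',)]): A returns [None], B returns [None]; on _extract_queries_from_explain([('x',), ('',)]): A returns [None], B returns [None]
import Mathlib
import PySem

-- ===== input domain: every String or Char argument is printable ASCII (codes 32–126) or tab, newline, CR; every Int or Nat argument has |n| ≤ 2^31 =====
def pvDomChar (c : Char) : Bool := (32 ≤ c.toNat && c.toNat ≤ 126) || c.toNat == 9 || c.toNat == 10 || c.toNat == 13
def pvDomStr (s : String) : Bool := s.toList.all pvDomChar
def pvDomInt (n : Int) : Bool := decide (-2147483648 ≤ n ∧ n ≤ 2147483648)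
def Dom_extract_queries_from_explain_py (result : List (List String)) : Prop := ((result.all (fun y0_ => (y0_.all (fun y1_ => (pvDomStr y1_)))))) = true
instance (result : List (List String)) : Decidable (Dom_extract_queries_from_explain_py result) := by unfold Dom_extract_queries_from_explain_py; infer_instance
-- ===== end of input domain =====

-- B replaces A's single-pass state machine (in-flight query accumulator flushed at each
-- sentinel) by a two-phase decomposition: partition the rows into sentinel-terminated
-- groups, then render each group independently. Objective: alternative decomposition.

-- ===== PORT A =====
-- the test '"Multicorn: " in o[0]'; o[0] is ported as o.headD "" (Python raises IndexError
-- on an empty row — excluded by Pre_)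
def pvMark (o : List String) : Bool := PySem.Str.isIn "Multicorn: " (o.headD "")

-- one iteration of A's for-loop: update query_str, then flush at a sentinel row.
-- At a sentinel Python appends query_str, which may be None (not a str) — excluded by
-- Pre_; the port appends (… ).getD "" there.
def pvStepA (st : List String × Option String) (o : List String) :
    List String × Option String :=
  let q' : Option String :=
    match st.2 with
    | some s => some (s ++ o.headD "")
    | none => if pvMark o then some "" else none
  if o = [""] then (st.1 ++ [q'.getD ""], none) else (st.1, q')

def extract_queries_from_explain_py (result : List (List String)) : List String :=
  (result.foldl pvStepA (([] : List String), (none : Option String))).1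

-- ===== PORT B =====
-- Source B's _render: next((i for i, o in enumerate(g) if "Multicorn: " in o[0]), None) is
-- List.findIdx?; "".join(o[0] for o in g[i+1:]) is PySem.Str.join of the dropped tail.
-- Source B returns None for a markerless group (excluded by Pre_); the port returns "" there.
def pvRenderB (g : List (List String)) : String :=
  match g.findIdx? pvMark with
  | none => ""
  | some i => PySem.Str.join "" ((g.drop (i + 1)).map (fun o => o.headD ""))

-- one iteration of Source B's grouping loop: cur.append(o), flush cur at a sentinel row
def pvStepB (st : List (List (List String)) × List (List String)) (o : List String) :
    List (List (List String)) × List (List String) :=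
  let cur := st.2 ++ [o]
  if o = [""] then (st.1 ++ [cur], ([] : List (List String))) else (st.1, cur)

def extract_queries_from_explain_py_alt (result : List (List String)) : List String :=
  ((result.foldl pvStepB
      (([] : List (List (List String))), ([] : List (List String)))).1).map pvRenderB

-- ===== PRECONDITION & SPEC =====
-- Pre_ excludes (a) inputs containing an empty row, where Python A raises IndexError on
-- o[0], and (b) inputs with a sentinel-terminated group that contains no 'Multicorn: '
-- marker, where Python A appends None — not a value of the declared type list[str].
def Pre_extract_queries_from_explain_py (result : List (List String)) : Prop :=
  (∀ o ∈ result, o ≠ []) ∧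
  ∀ g ∈ (result.splitOn [""]).dropLast, ∃ o ∈ g, pvMark o = true
instance (result : List (List String)) : Decidable (Pre_extract_queries_from_explain_py result) := by unfold Pre_extract_queries_from_explain_py; infer_instance

def pvWitness_extract_queries_from_explain_py : List (List String) :=
  [["Multicorn: SELECT 1"], ["foo"], [""]]

def Spec_extract_queries_from_explain_py (result : List (List String)) (out : List String) : Prop := out = extract_queries_from_explain_py_alt result
instance (result : List (List String)) (out : List String) : Decidable (Spec_extract_queries_from_explain_py result out) := by unfold Spec_extract_queries_from_explain_py; infer_instance

-- ===== CLAIM (what is proved, stated in full; the proofs are below) =====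
def Claim_equal_extract_queries_from_explain_py : Prop := ∀ (result : List (List String)), Dom_extract_queries_from_explain_py result → Pre_extract_queries_from_explain_py result → Spec_extract_queries_from_explain_py result (extract_queries_from_explain_py result)

-- ===== LEMMAS AND PROOFS =====

-- recursive form of B's grouping loop
def pvGrp (cur : List (List String)) : List (List String) → List (List (List String))
  | [] => []
  | o :: rs => if o = [""] then (cur ++ [o]) :: pvGrp [] rs else pvGrp (cur ++ [o]) rs

-- the next in-flight query_str after row o (the body of pvStepA's let)
def pvNextA (q : Option String) (o : List String) : Option String :=
  match q with
  | some s => some (s ++ o.headD "")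
  | none => if pvMark o then some "" else none

-- recursive form of A's loop, emitting the flushed strings
def pvTail (q : Option String) : List (List String) → List String
  | [] => []
  | o :: rs =>
      if o = [""] then (pvNextA q o).getD "" :: pvTail none rs
      else pvTail (pvNextA q o) rs

-- A's in-flight query_str after having consumed the rows of the open group cur
def pvROpt (cur : List (List String)) : Option String :=
  (cur.findIdx? pvMark).map
    (fun i => PySem.Str.join "" ((cur.drop (i + 1)).map (fun o => o.headD "")))

theorem pvRenderB_eq (g : List (List String)) : pvRenderB g = (pvROpt g).getD "" := by
  unfold pvRenderB pvROpt
  cases g.findIdx? pvMark <;> rfl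

-- '' .join over cs is List.flatten of the pieces
theorem pvJoinNil (L : List (List Char)) : PySem.Chars.join [] L = L.flatten := by
  show List.intercalate [] L = L.flatten
  simp only [List.intercalate]
  induction L with
  | nil => rfl
  | cons a L ih => cases L <;> simp_all [List.intersperse]

theorem pvJoin_append (l : List String) (x : String) :
    PySem.Str.join "" (l ++ [x]) = PySem.Str.join "" l ++ x := by
  simp [PySem.Str.join, pvJoinNil]

-- consuming one more row o updates A's in-flight state exactly as pvNextA does
theorem pvROpt_append (cur : List (List String)) (o : List String) :
    pvROpt (cur ++ [o]) = pvNextA (pvROpt cur) o := by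
  unfold pvROpt pvNextA
  rw [List.findIdx?_append]
  cases h : cur.findIdx? pvMark with
  | some i =>
      have hi : i < cur.length := by
        have := List.findIdx?_eq_some_iff_findIdx_eq.mp h
        omega
      simp only [Option.some_or, Option.map_some]
      rw [List.drop_append_of_le_length (by simpa using (by omega : i + 1 ≤ cur.length)),
        List.map_append]
      simp [pvJoin_append]
  | none =>
      simp only [Option.none_or, Option.map_map]
      cases hm : pvMark o
      · simp [List.findIdx?, List.findIdx?.go, hm]
      · simp only [List.findIdx?, List.findIdx?.go, hm, if_true, Option.map_some,
          Function.comp_apply, Nat.zero_add]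
        rw [List.drop_eq_nil_of_le (by simp)]
        rfl

theorem pvGrp_fold (rs : List (List String)) (gs : List (List (List String)))
    (cur : List (List String)) :
    (rs.foldl pvStepB (gs, cur)).1 = gs ++ pvGrp cur rs := by
  induction rs generalizing gs cur with
  | nil => simp [pvGrp]
  | cons o rs ih =>
      rw [List.foldl_cons]
      by_cases h : o = [""]
      · rw [show pvStepB (gs, cur) o = (gs ++ [cur ++ [o]], []) from by
          simp [pvStepB, h], ih, pvGrp, if_pos h]
        simp
      · rw [show pvStepB (gs, cur) o = (gs, cur ++ [o]) from by
          simp [pvStepB, h], ih, pvGrp, if_neg h]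

theorem pvTail_fold (rs : List (List String)) (qs : List String) (q : Option String) :
    (rs.foldl pvStepA (qs, q)).1 = qs ++ pvTail q rs := by
  induction rs generalizing qs q with
  | nil => simp [pvTail]
  | cons o rs ih =>
      rw [List.foldl_cons]
      by_cases h : o = [""]
      · rw [show pvStepA (qs, q) o = (qs ++ [(pvNextA q o).getD ""], none) from by
          simp [pvStepA, pvNextA, h], ih, pvTail, if_pos h]
        simp
      · rw [show pvStepA (qs, q) o = (qs, pvNextA q o) from by
          simp [pvStepA, pvNextA, h], ih, pvTail, if_neg h]

-- A's flush loop on the remaining rows = B's render of the remaining complete groups,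
-- when A's in-flight state corresponds to the open group cur
theorem pvTail_eq_map_render (rs : List (List String)) (cur : List (List String)) :
    pvTail (pvROpt cur) rs = (pvGrp cur rs).map pvRenderB := by
  induction rs generalizing cur with
  | nil => simp [pvTail, pvGrp]
  | cons o rs ih =>
      rw [pvTail, pvGrp]
      by_cases h : o = [""]
      · rw [if_pos h, if_pos h, List.map_cons, pvRenderB_eq, ← pvROpt_append]
        have hnil := ih ([] : List (List String))
        rw [show pvROpt ([] : List (List String)) = none from rfl] at hnil
        rw [hnil]
      · rw [if_neg h, if_neg h, ← pvROpt_append]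
        exact ih (cur ++ [o])

-- ===== VERDICT (by name: the statement is the Claim_ definition above) =====
theorem extract_queries_from_explain_py_spec : Claim_equal_extract_queries_from_explain_py := by
  intro result _ _
  unfold Spec_extract_queries_from_explain_py extract_queries_from_explain_py
    extract_queries_from_explain_py_alt
  rw [pvTail_fold, pvGrp_fold]
  have h0 : pvROpt ([] : List (List String)) = none := rfl
  simp only [List.nil_append]
  rw [← h0, pvTail_eq_map_render]
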